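-- pv_equiv track=rewrite | github.com/beskrovnayaaaaa/-1- | task6.py | sum_x
-- ===== SOURCE A (Python) =====
-- def sum_x(tochki):
--     S4 = S3 = S2 = S1 = 0
--     for i in range(len(tochki)):
--         S4 += tochki[i][0] ** 4
--         S3 += tochki[i][0] ** 3
--         S2 += tochki[i][0] ** 2
--         S1 += tochki[i][0]
--     return S4, S3, S2, S1
-- ===== SOURCE B (Python) =====
-- def sum_x(tochki):
--     S4 = sum(p[0] ** 4 for p in tochki)
--     S3 = sum(p[0] ** 3 for p in tochki)
--     S2 = sum(p[0] ** 2 for p in tochki)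
--     S1 = sum(p[0] for p in tochki)
--     return S4, S3, S2, S1
-- ===== Notes on version B (the rewrite author's own statement) =====
-- stated objective: idiomatic
-- what changed: A's single fused index loop accumulating four running sums is replaced by four independent sum()-over-generator passes, one per power.
import Mathlib
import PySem

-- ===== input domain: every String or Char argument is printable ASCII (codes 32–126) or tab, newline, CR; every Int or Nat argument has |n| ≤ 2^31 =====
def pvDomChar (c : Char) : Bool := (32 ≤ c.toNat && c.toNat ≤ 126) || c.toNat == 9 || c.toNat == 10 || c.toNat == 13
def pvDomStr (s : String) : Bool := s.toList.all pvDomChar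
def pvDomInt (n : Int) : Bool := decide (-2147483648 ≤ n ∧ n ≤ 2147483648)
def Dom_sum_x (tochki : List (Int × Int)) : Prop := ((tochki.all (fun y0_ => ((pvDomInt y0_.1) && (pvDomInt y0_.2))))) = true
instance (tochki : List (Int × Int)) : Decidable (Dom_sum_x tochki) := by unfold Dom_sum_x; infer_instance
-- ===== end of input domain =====

-- B computes each power sum with its own pass instead of A's single fused accumulating loop (idiomatic; same O(n) cost).


-- ===== PORT A =====
-- A's "for i in range(len(tochki))" loop updating S4,S3,S2,S1 in place, as a fold over the
-- list with the 4-tuple accumulator (same state, same order; indices are always in range).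
def sum_x (tochki : List (Int × Int)) : Int × Int × Int × Int :=
  tochki.foldl
    (fun s p => (s.1 + p.1 ^ 4, s.2.1 + p.1 ^ 3, s.2.2.1 + p.1 ^ 2, s.2.2.2 + p.1))
    (0, 0, 0, 0)

-- ===== PORT B =====
-- B: four independent passes, one sum per power.
def sum_x_alt (tochki : List (Int × Int)) : Int × Int × Int × Int :=
  ((tochki.map (fun p => p.1 ^ 4)).sum,
   (tochki.map (fun p => p.1 ^ 3)).sum,
   (tochki.map (fun p => p.1 ^ 2)).sum,
   (tochki.map (fun p => p.1)).sum)

-- ===== PRECONDITION & SPEC =====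
def Spec_sum_x (tochki : List (Int × Int)) (out : Int × Int × Int × Int) : Prop := out = sum_x_alt tochki
instance (tochki : List (Int × Int)) (out : Int × Int × Int × Int) : Decidable (Spec_sum_x tochki out) := by unfold Spec_sum_x; infer_instance

-- ===== CLAIM (what is proved, stated in full; the proofs are below) =====
def Claim_equal_sum_x : Prop := ∀ (tochki : List (Int × Int)), Dom_sum_x tochki → Spec_sum_x tochki (sum_x tochki)

-- ===== LEMMAS AND PROOFS =====

-- ===== VERDICT (by name: the statement is the Claim_ definition above) =====
lemma sum_x_foldl (l : List (Int × Int)) (a b c d : Int) :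
    l.foldl
      (fun s p => (s.1 + p.1 ^ 4, s.2.1 + p.1 ^ 3, s.2.2.1 + p.1 ^ 2, s.2.2.2 + p.1))
      (a, b, c, d)
    = (a + (l.map (fun p => p.1 ^ 4)).sum,
       b + (l.map (fun p => p.1 ^ 3)).sum,
       c + (l.map (fun p => p.1 ^ 2)).sum,
       d + (l.map (fun p => p.1)).sum) := by
  induction l generalizing a b c d with
  | nil => simp
  | cons p t ih => simp [ih]; refine ⟨by ring, by ring, by ring, by ring⟩

theorem sum_x_spec : Claim_equal_sum_x := by
  intro tochki _
  show sum_x tochki = sum_x_alt tochki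
  simp [sum_x, sum_x_alt, sum_x_foldl]
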